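-- pv_equiv track=rewrite | github.com/lks21c/deepagents | libs/deepagents/deepagents/middleware/filesystem.py | _file_data_reducer
-- ===== SOURCE A (Python) =====
-- from typing_extensions import TypedDict
--
-- class FileData(TypedDict):
--     """파일 내용과 메타데이터를 저장하는 데이터 구조.
--
--     에이전트 상태에 파일을 저장할 때 사용되는 TypedDict입니다.
--     StateBackend에서 파일 정보를 관리하는 데 활용됩니다.
--
--     Attributes:
--         content: 파일의 각 라인을 담은 문자열 리스트.
--         created_at: 파일 생성 시각 (ISO 8601 형식).
--         modified_at: 마지막 수정 시각 (ISO 8601 형식).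
--     """
--
--     content: list[str]
--     """파일의 각 라인 목록."""
--
--     created_at: str
--     """파일 생성 시각 (ISO 8601 타임스탬프)."""
--
--     modified_at: str
--     """마지막 수정 시각 (ISO 8601 타임스탬프)."""
--
-- def _file_data_reducer(left: dict[str, FileData] | None, right: dict[str, FileData | None]) -> dict[str, FileData]:
--     """파일 업데이트를 병합하며 삭제도 지원하는 리듀서.
--
--     이 리듀서는 right 딕셔너리의 `None` 값을 삭제 마커로 처리하여
--     파일 삭제를 가능하게 합니다. LangGraph의 상태 관리 시스템에서
--     어노테이션된 리듀서가 상태 업데이트 병합을 제어하도록 설계되었습니다.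
--
--     Args:
--         left: 기존 파일 딕셔너리. 초기화 시 `None`일 수 있음.
--         right: 병합할 새 파일 딕셔너리. `None` 값을 가진 파일은
--             삭제 마커로 처리되어 결과에서 제거됨.
--
--     Returns:
--         동일 키에 대해 right가 left를 덮어쓰고,
--         right의 `None` 값은 삭제를 트리거하는 병합된 딕셔너리.
--
--     사용 예시:
--         ```python
--         existing = {"/file1.txt": FileData(...), "/file2.txt": FileData(...)}
--         updates = {"/file2.txt": None, "/file3.txt": FileData(...)}
--         result = file_data_reducer(existing, updates)
--         # 결과: {"/file1.txt": FileData(...), "/file3.txt": FileData(...)}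
--         # file2.txt는 삭제되고 file3.txt가 추가됨
--         ```
--     """
--     # left가 None이면 right에서 None이 아닌 값만 반환
--     if left is None:
--         return {k: v for k, v in right.items() if v is not None}
--
--     # left를 복사하여 시작
--     result = {**left}
--
--     # right의 각 항목을 처리
--     for key, value in right.items():
--         if value is None:
--             # None 값은 삭제 마커로 처리
--             result.pop(key, None)
--         else:
--             # None이 아니면 값을 덮어쓰기
--             result[key] = value
--     return result
-- ===== SOURCE B (Python) =====
-- def _file_data_reducer(left, right):
--     """Merge file updates, treating None values in right as deletions."""
--     existing = left or {}
--     result = {}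
--     # pass 1: walk the existing files; a right entry overrides (or, if None, drops) each
--     for key, value in existing.items():
--         if key in right:
--             update = right[key]
--             if update is not None:
--                 result[key] = update
--         else:
--             result[key] = value
--     # pass 2: append genuinely new files from right
--     for key, update in right.items():
--         if key not in existing and update is not None:
--             result[key] = update
--     return result
-- ===== Notes on version B (the rewrite author's own statement) =====
-- stated objective: alternative
-- what changed: B replaces A's right-major loop that mutates a copy of left with pop/assign branches by a deletion-free two-pass build: a left-major pass that keeps, overrides or drops each existing entry by looking its key up in right, then an append pass for right keys not in left; Pre_ only excludes association lists whose right-hand keys repeat, which no Python dict can represent.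
import Mathlib
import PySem

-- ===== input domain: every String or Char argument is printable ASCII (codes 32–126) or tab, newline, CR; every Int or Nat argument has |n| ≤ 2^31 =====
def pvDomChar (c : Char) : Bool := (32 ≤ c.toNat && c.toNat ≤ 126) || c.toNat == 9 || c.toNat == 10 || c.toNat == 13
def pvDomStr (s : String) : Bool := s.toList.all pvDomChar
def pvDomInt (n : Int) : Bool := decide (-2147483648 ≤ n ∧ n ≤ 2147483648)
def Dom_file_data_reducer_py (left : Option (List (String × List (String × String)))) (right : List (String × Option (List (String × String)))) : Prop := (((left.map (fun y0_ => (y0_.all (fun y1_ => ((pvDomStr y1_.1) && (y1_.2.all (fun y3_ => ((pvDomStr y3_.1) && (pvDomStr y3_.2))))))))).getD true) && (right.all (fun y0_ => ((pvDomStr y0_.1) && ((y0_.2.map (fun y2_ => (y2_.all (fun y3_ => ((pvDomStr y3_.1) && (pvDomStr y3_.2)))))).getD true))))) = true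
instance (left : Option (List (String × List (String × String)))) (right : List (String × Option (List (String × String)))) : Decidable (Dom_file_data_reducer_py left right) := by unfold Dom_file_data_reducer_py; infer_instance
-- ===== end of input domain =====

-- B replaces A's right-major loop mutating a copy of left (pop/assign branches) by a deletion-free
-- two-pass build: a left-major pass that keeps, overrides or drops each existing entry by looking
-- its key up in right, then an append pass for right keys not in left (objective: alternative).

-- ===== PORT A =====
-- {k: v for k, v in right.items() if v is not None}
def pvASkip (right : List (String × Option (List (String × String)))) :
    PySem.Dict String (List (String × String)) :=
  right.foldl (fun d kv =>
    match kv.2 with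
    | none => d
    | some v => d.insert kv.1 v) PySem.Dict.empty

-- result = {**left}
def pvAFromLeft (l : List (String × List (String × String))) :
    PySem.Dict String (List (String × String)) :=
  l.foldl (fun d kv => d.insert kv.1 kv.2) PySem.Dict.empty

-- the update loop: None pops the key, otherwise overwrite
def pvAUpdate (right : List (String × Option (List (String × String))))
    (result : PySem.Dict String (List (String × String))) :
    PySem.Dict String (List (String × String)) :=
  right.foldl (fun d kv =>
    match kv.2 with
    | none => d.erase kv.1
    | some v => d.insert kv.1 v) result

def file_data_reducer_py (left : Option (List (String × List (String × String)))) (right : List (String × Option (List (String × String)))) : List (String × List (String × String)) :=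
  match left with
  | none => (pvASkip right).items
  | some l => (pvAUpdate right (pvAFromLeft l)).items

-- ===== PORT B =====
-- existing = left or {}   (as a dict)
def pvBLeftD (l : List (String × List (String × String))) :
    PySem.Dict String (List (String × String)) :=
  l.foldl (fun d kv => d.insert kv.1 kv.2) PySem.Dict.empty

-- the dict right (for `key in right` / `right[key]` lookups and the pass-2 iteration)
def pvBRightD (right : List (String × Option (List (String × String)))) :
    PySem.Dict String (Option (List (String × String))) :=
  right.foldl (fun d kv => d.insert kv.1 kv.2) PySem.Dict.empty

-- pass 1: walk the existing files; a right entry overrides (or, if None, drops) each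
def pvBPass1 (rightD : PySem.Dict String (Option (List (String × String))))
    (existingItems : List (String × List (String × String))) :
    PySem.Dict String (List (String × String)) :=
  existingItems.foldl (fun res kv =>
    match rightD.get? kv.1 with
    | some upd =>
      match upd with
      | some u => res.insert kv.1 u
      | none => res
    | none => res.insert kv.1 kv.2) PySem.Dict.empty

-- pass 2: append genuinely new files from right
def pvBPass2 (leftD : PySem.Dict String (List (String × String)))
    (res1 : PySem.Dict String (List (String × String)))
    (rightItems : List (String × Option (List (String × String)))) :
    PySem.Dict String (List (String × String)) :=
  rightItems.foldl (fun res kv =>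
    if leftD.contains kv.1 then res
    else
      match kv.2 with
      | some u => res.insert kv.1 u
      | none => res) res1

def file_data_reducer_py_alt (left : Option (List (String × List (String × String)))) (right : List (String × Option (List (String × String)))) : List (String × List (String × String)) :=
  (pvBPass2 (pvBLeftD (left.getD []))
    (pvBPass1 (pvBRightD right) (pvBLeftD (left.getD [])).items)
    (pvBRightD right).items).items

-- ===== PRECONDITION & SPEC =====
-- Pre_ excludes only association lists whose right-hand keys repeat: a Python dict cannot hold
-- duplicate keys, so such lists correspond to no input the Python function ever receives.
def Pre_file_data_reducer_py (left : Option (List (String × List (String × String)))) (right : List (String × Option (List (String × String)))) : Prop :=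
  (right.map Prod.fst).Nodup
instance (left : Option (List (String × List (String × String)))) (right : List (String × Option (List (String × String)))) : Decidable (Pre_file_data_reducer_py left right) := by unfold Pre_file_data_reducer_py; infer_instance

def pvWitness_file_data_reducer_py : (Option (List (String × List (String × String)))) × (List (String × Option (List (String × String)))) :=
  (some [("a", [("content", "x")])], [("b", some [("content", "y")]), ("a", none)])

def Spec_file_data_reducer_py (left : Option (List (String × List (String × String)))) (right : List (String × Option (List (String × String)))) (out : List (String × List (String × String))) : Prop := out = file_data_reducer_py_alt left right
instance (left : Option (List (String × List (String × String)))) (right : List (String × Option (List (String × String)))) (out : List (String × List (String × String))) : Decidable (Spec_file_data_reducer_py left right out) := by unfold Spec_file_data_reducer_py; infer_instance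

-- ===== CLAIM (what is proved, stated in full; the proofs are below) =====
def Claim_equal_file_data_reducer_py : Prop := ∀ (left : Option (List (String × List (String × String)))) (right : List (String × Option (List (String × String)))), Dom_file_data_reducer_py left right → Pre_file_data_reducer_py left right → Spec_file_data_reducer_py left right (file_data_reducer_py left right)

-- ===== LEMMAS AND PROOFS =====

-- the value of "drop the None entries" on an items list, as a pure list operation
def pvDropNone (l : List (String × Option (List (String × String)))) :
    List (String × List (String × String)) :=
  l.filterMap (fun kv => kv.2.map (fun v => (kv.1, v)))

lemma pvDropNone_cons_some (k : String) (v : List (String × String))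
    (l : List (String × Option (List (String × String)))) :
    pvDropNone ((k, some v) :: l) = (k, v) :: pvDropNone l := rfl

lemma pvDropNone_cons_none (k : String)
    (l : List (String × Option (List (String × String)))) :
    pvDropNone ((k, (none : Option (List (String × String)))) :: l) = pvDropNone l := rfl

lemma pvMem_dropNone {k : String} {w : List (String × String)}
    {l : List (String × Option (List (String × String)))} :
    (k, w) ∈ pvDropNone l ↔ (k, some w) ∈ l := by
  unfold pvDropNone
  rw [List.mem_filterMap]
  constructor
  · rintro ⟨⟨ak, av⟩, ha, hfa⟩
    cases av with
    | none => simp at hfa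
    | some v =>
      simp only [Option.map_some, Option.some.injEq, Prod.mk.injEq] at hfa
      obtain ⟨h1, h2⟩ := hfa
      subst h1; subst h2; exact ha
  · intro h
    exact ⟨(k, some w), h, rfl⟩

lemma pvDropNone_append_some (l : List (String × Option (List (String × String))))
    (k : String) (w : List (String × String)) :
    pvDropNone (l ++ [(k, some w)]) = pvDropNone l ++ [(k, w)] := by
  simp [pvDropNone]

lemma pvDropNone_append_none (l : List (String × Option (List (String × String))))
    (k : String) :
    pvDropNone (l ++ [(k, (none : Option (List (String × String))))]) = pvDropNone l := by
  simp [pvDropNone]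

lemma pvDropNone_map_wrap (l : List (String × List (String × String))) :
    pvDropNone (l.map (fun p => (p.1, some p.2))) = l := by
  induction l with
  | nil => rfl
  | cons p tl ih =>
    obtain ⟨pk, pv⟩ := p
    simp only [List.map_cons]
    rw [pvDropNone_cons_some, ih]

-- replacing key k's value by `some w` commutes with the filter when no k-entry is None
lemma pvDropNone_replace_some {k : String} {w : List (String × String)}
    {l : List (String × Option (List (String × String)))}
    (h : ∀ p ∈ l, p.1 = k → p.2 ≠ none) :
    pvDropNone (l.map (fun p => if p.1 == k then (k, some w) else p))
      = (pvDropNone l).map (fun p => if p.1 == k then (k, w) else p) := by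
  induction l with
  | nil => rfl
  | cons p tl ih =>
    obtain ⟨pk, pv⟩ := p
    have htl : ∀ p ∈ tl, p.1 = k → p.2 ≠ none := fun p hp => h p (List.mem_cons_of_mem _ hp)
    simp only [List.map_cons]
    by_cases hk : pk = k
    · obtain ⟨v, rfl⟩ : ∃ v, pv = some v := by
        cases pv with
        | none => exact absurd rfl (h (pk, none) (by simp) hk)
        | some v => exact ⟨v, rfl⟩
      rw [if_pos (show ((pk, some v).1 == k) = true by simp [hk]),
          pvDropNone_cons_some, pvDropNone_cons_some, List.map_cons,
          if_pos (show (((pk, v) : String × List (String × String)).1 == k) = true by simp [hk]),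
          ih htl]
    · have hne : ¬(((pk, pv).1 == k) = true) := by simp [hk]
      rw [if_neg hne]
      cases pv with
      | none => rw [pvDropNone_cons_none, pvDropNone_cons_none, ih htl]
      | some v =>
        rw [pvDropNone_cons_some, pvDropNone_cons_some, List.map_cons,
            if_neg (show ¬((((pk, v) : String × List (String × String)).1 == k) = true) by simp [hk]),
            ih htl]

-- replacing key k's value by None filters every k-entry out
lemma pvDropNone_replace_none {k : String}
    {l : List (String × Option (List (String × String)))} :
    pvDropNone (l.map (fun p => if p.1 == k then (k, (none : Option (List (String × String)))) else p))
      = (pvDropNone l).filter (fun p => !(p.1 == k)) := by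
  induction l with
  | nil => rfl
  | cons p tl ih =>
    obtain ⟨pk, pv⟩ := p
    simp only [List.map_cons]
    by_cases hk : pk = k
    · rw [if_pos (show (((pk, pv) : String × Option (List (String × String))).1 == k) = true by simp [hk]),
          pvDropNone_cons_none]
      cases pv with
      | none => rw [pvDropNone_cons_none, ih]
      | some v =>
        rw [pvDropNone_cons_some, List.filter_cons,
            if_neg (show ¬((!((((pk, v) : String × List (String × String)).1 == k))) = true) by simp [hk]), ih]
    · have hne : ¬(((pk, pv).1 == k) = true) := by simp [hk]
      rw [if_neg hne]
      cases pv with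
      | none => rw [pvDropNone_cons_none, pvDropNone_cons_none, ih]
      | some v =>
        rw [pvDropNone_cons_some, pvDropNone_cons_some, List.filter_cons,
            if_pos (show (!((((pk, v) : String × List (String × String)).1 == k))) = true by simp [hk]), ih]

-- a dict not containing k: its items have no key k, so erase is the identity
lemma pvErase_not_contains (a : PySem.Dict String (List (String × String))) (k : String)
    (h : a.contains k = false) : (a.erase k).items = a.items := by
  rw [PySem.Dict.contains_eq_decide_mem_keys] at h
  have hk : k ∉ a.keys := by simpa using h
  show a.items.filter (fun p => !(p.1 == k)) = a.items
  rw [List.filter_eq_self]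
  intro p hp
  have hpk : p.1 ∈ a.keys := PySem.Dict.mem_keys_of_mem_items _ hp
  have hne : p.1 ≠ k := fun he => hk (he ▸ hpk)
  simp [hne]

-- membership transfer from a = dropNone b: if b has no binding at k, neither has a
lemma pvContains_of_dropNone {a : PySem.Dict String (List (String × String))}
    {b : PySem.Dict String (Option (List (String × String)))}
    (ha : a.items = pvDropNone b.items) {k : String}
    (hb : b.get? k = none) : a.contains k = false := by
  rw [PySem.Dict.contains_eq_decide_mem_keys]
  rw [decide_eq_false_iff_not]
  intro hk
  have hk' : k ∈ a.items.map Prod.fst := hk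
  obtain ⟨⟨k1, w⟩, hmem, hfst⟩ := List.mem_map.mp hk'
  simp only at hfst
  subst hfst
  rw [ha] at hmem
  have h2 : (k1, some w) ∈ b.items := pvMem_dropNone.mp hmem
  have h3 : k1 ∈ b.keys := PySem.Dict.mem_keys_of_mem_items _ h2
  have h4 : b.contains k1 = true := by
    rw [PySem.Dict.contains_eq_decide_mem_keys]; exact decide_eq_true h3
  rw [PySem.Dict.contains_eq_isSome_get?, hb] at h4
  simp at h4

-- an insert-fold over distinct fresh keys from the empty dict lists exactly its input
lemma pvFoldl_insert_items (l : List (String × Option (List (String × String))))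
    (h : (l.map Prod.fst).Nodup) :
    (l.foldl (fun d kv => d.insert kv.1 kv.2) PySem.Dict.empty).items = l := by
  have := PySem.Dict.items_foldl_insert_fresh (l := l) (k := Prod.fst) (v := Prod.snd)
    (d := PySem.Dict.empty) (fun a _ => PySem.Dict.contains_empty _) h
  simpa [Prod.mk.eta] using this

-- proof-only: left's dict with every value wrapped in `some` (the common midpoint with A)
def pvWrapL (l : List (String × List (String × String))) :
    PySem.Dict String (Option (List (String × String))) :=
  l.foldl (fun d kv => d.insert kv.1 (some kv.2)) PySem.Dict.empty

-- proof-only: the overlay {**b, **right}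
def pvOverlay (right : List (String × Option (List (String × String))))
    (base : PySem.Dict String (Option (List (String × String)))) :
    PySem.Dict String (Option (List (String × String))) :=
  right.foldl (fun d kv => d.insert kv.1 kv.2) base

lemma pvWrapAux (l : List (String × List (String × String)))
    (a : PySem.Dict String (List (String × String)))
    (b : PySem.Dict String (Option (List (String × String))))
    (h : b.items = a.items.map (fun p => (p.1, some p.2))) :
    (l.foldl (fun d kv => d.insert kv.1 (some kv.2)) b).items
      = (l.foldl (fun d kv => d.insert kv.1 kv.2) a).items.map (fun p => (p.1, some p.2)) := by
  induction l generalizing a b with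
  | nil => exact h
  | cons p tl ih =>
    obtain ⟨pk, pv⟩ := p
    simp only [List.foldl_cons]
    apply ih
    have hkeys : b.keys = a.keys := by
      show b.items.map Prod.fst = a.items.map Prod.fst
      rw [h, List.map_map]
      exact List.map_congr_left (fun q _ => rfl)
    have hcont : b.contains pk = a.contains pk := by
      rw [PySem.Dict.contains_eq_decide_mem_keys, PySem.Dict.contains_eq_decide_mem_keys, hkeys]
    rw [PySem.Dict.items_insert, PySem.Dict.items_insert, hcont]
    by_cases hc : a.contains pk = true
    · rw [if_pos hc, if_pos hc, h, List.map_map, List.map_map]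
      apply List.map_congr_left
      intro q _
      by_cases hq : q.1 = pk
      · simp [Function.comp, hq]
      · simp [Function.comp, hq]
    · rw [if_neg hc, if_neg hc, h, List.map_append]
      rfl

lemma pvWrapL_items (l : List (String × List (String × String))) :
    (pvWrapL l).items = (pvAFromLeft l).items.map (fun p => (p.1, some p.2)) :=
  pvWrapAux l PySem.Dict.empty PySem.Dict.empty rfl

-- main invariant for A: the pop/assign loop tracks the overlay through the None-filter
lemma pvMain (right : List (String × Option (List (String × String)))) :
    ∀ (a : PySem.Dict String (List (String × String)))
      (b : PySem.Dict String (Option (List (String × String)))),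
    (right.map Prod.fst).Nodup → b.keys.Nodup →
    a.items = pvDropNone b.items →
    (∀ kv ∈ right, b.get? kv.1 ≠ some none) →
    (pvAUpdate right a).items = pvDropNone (pvOverlay right b).items := by
  induction right with
  | nil => intro a b _ _ ha _; exact ha
  | cons p tl ih =>
    intro a b hnr hbn ha hnone
    obtain ⟨k, v⟩ := p
    have hk_notin : k ∉ tl.map Prod.fst := by
      simp only [List.map_cons, List.nodup_cons] at hnr; exact hnr.1
    have hnr' : (tl.map Prod.fst).Nodup := by
      simp only [List.map_cons, List.nodup_cons] at hnr; exact hnr.2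
    have hne_tl : ∀ kv ∈ tl, kv.1 ≠ k := by
      intro kv hkv he
      exact hk_notin (he ▸ List.mem_map_of_mem hkv)
    have hbn' : ∀ (w : Option (List (String × String))), (b.insert k w).keys.Nodup := by
      intro w
      exact PySem.Dict.nodup_keys_insert _ _ _ hbn
    have hnone' : ∀ (w : Option (List (String × String))),
        ∀ kv ∈ tl, (b.insert k w).get? kv.1 ≠ some none := by
      intro w kv hkv
      rw [PySem.Dict.get?_insert, if_neg (hne_tl kv hkv)]
      exact hnone kv (List.mem_cons_of_mem _ hkv)
    cases v with
    | some w =>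
      show (pvAUpdate tl (a.insert k w)).items
          = pvDropNone (pvOverlay tl (b.insert k (some w))).items
      apply ih _ _ hnr' (hbn' (some w)) _ (hnone' (some w))
      rcases hb : b.get? k with _ | ow
      · have hca : a.contains k = false := pvContains_of_dropNone ha hb
        have hcb : b.contains k = false := by
          rw [PySem.Dict.contains_eq_isSome_get?, hb]; rfl
        rw [PySem.Dict.items_insert, PySem.Dict.items_insert,
            if_neg (show ¬(b.contains k = true) by simp [hcb]),
            if_neg (show ¬(a.contains k = true) by simp [hca]),
            pvDropNone_append_some, ha]
      · have how : ow ≠ none := by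
          have hx := hnone (k, some w) (by simp)
          intro he; rw [he] at hb; exact hx hb
        obtain ⟨w', rfl⟩ : ∃ w', ow = some w' := by
          cases ow with
          | none => exact absurd rfl how
          | some w' => exact ⟨w', rfl⟩
        have hmemb : (k, some w') ∈ b.items := PySem.Dict.mem_items_of_get?_eq_some _ hb
        have hmema : (k, w') ∈ a.items := by rw [ha]; exact pvMem_dropNone.mpr hmemb
        have hcb : b.contains k = true := by
          rw [PySem.Dict.contains_eq_isSome_get?, hb]; rfl
        have hca : a.contains k = true := by
          rw [PySem.Dict.contains_eq_decide_mem_keys]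
          exact decide_eq_true (PySem.Dict.mem_keys_of_mem_items _ hmema)
        rw [PySem.Dict.items_insert, PySem.Dict.items_insert, if_pos hcb, if_pos hca, ha]
        refine (pvDropNone_replace_some ?_).symm
        intro q hq hqk
        obtain ⟨qk, qv⟩ := q
        simp only at hqk
        subst hqk
        have hgq := PySem.Dict.get?_of_mem_items _ hq hbn
        rw [hb] at hgq
        intro he
        have he' : qv = none := he
        rw [he'] at hgq
        simp at hgq
    | none =>
      show (pvAUpdate tl (a.erase k)).items
          = pvDropNone (pvOverlay tl (b.insert k none)).items
      apply ih _ _ hnr' (hbn' none) _ (hnone' none)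
      rcases hb : b.get? k with _ | ow
      · have hca : a.contains k = false := pvContains_of_dropNone ha hb
        have hcb : b.contains k = false := by
          rw [PySem.Dict.contains_eq_isSome_get?, hb]; rfl
        rw [PySem.Dict.items_insert,
            if_neg (show ¬(b.contains k = true) by simp [hcb]),
            pvDropNone_append_none, pvErase_not_contains _ _ hca, ha]
      · have hcb : b.contains k = true := by
          rw [PySem.Dict.contains_eq_isSome_get?, hb]; rfl
        rw [PySem.Dict.items_insert, if_pos hcb]
        show a.items.filter (fun p => !(p.1 == k)) = _
        rw [ha]
        exact pvDropNone_replace_none.symm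

-- first-match association lookup on the raw right list
def pvLookup (R : List (String × Option (List (String × String)))) (x : String) :
    Option (Option (List (String × String))) :=
  (R.find? (fun kv => kv.1 == x)).map Prod.snd

lemma pvLookup_cons (k : String) (v : Option (List (String × String)))
    (tl : List (String × Option (List (String × String)))) (x : String) :
    pvLookup ((k, v) :: tl) x = if k = x then some v else pvLookup tl x := by
  by_cases h : k = x
  · simp [pvLookup, h]
  · have hb : (k == x) = false := by simp [h]
    simp [pvLookup, hb, h]

lemma pvLookup_eq_none {R : List (String × Option (List (String × String)))} {x : String}
    (h : x ∉ R.map Prod.fst) : pvLookup R x = none := by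
  unfold pvLookup
  rw [List.find?_eq_none.mpr, Option.map_none]
  intro kv hkv
  simp only [beq_iff_eq]
  intro he
  exact h (he ▸ List.mem_map_of_mem hkv)

-- with distinct keys, the dict built from right answers exactly the list lookup
lemma pvGet?_rightD (R : List (String × Option (List (String × String))))
    (h : (R.map Prod.fst).Nodup) (x : String) :
    (pvBRightD R).get? x = pvLookup R x := by
  have hitems : (pvBRightD R).items = R := pvFoldl_insert_items R h
  have hkeys : (pvBRightD R).keys = R.map Prod.fst := by
    show (pvBRightD R).items.map Prod.fst = R.map Prod.fst
    rw [hitems]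
  rcases hf : R.find? (fun kv => kv.1 == x) with _ | kv
  · have hx : x ∉ R.map Prod.fst := by
      intro hx
      obtain ⟨q, hq, hqx⟩ := List.mem_map.mp hx
      have := List.find?_eq_none.mp hf q hq
      simp [hqx] at this
    have : (pvBRightD R).get? x = none := by
      rw [PySem.Dict.get?_eq_none_iff_not_mem_keys, hkeys]
      exact hx
    rw [this]
    unfold pvLookup
    rw [hf]
    rfl
  · have hkx : kv.1 = x := by
      have := List.find?_some hf
      simpa using this
    have hmem : kv ∈ (pvBRightD R).items := by rw [hitems]; exact List.mem_of_find?_eq_some hf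
    have hnd : (pvBRightD R).keys.Nodup := by rw [hkeys]; exact h
    have hthis : (pvBRightD R).get? kv.1 = some kv.2 :=
      PySem.Dict.get?_of_mem_items _ (by simpa [Prod.mk.eta] using hmem) hnd
    have hgx : (pvBRightD R).get? x = some kv.2 := by rw [← hkx]; exact hthis
    rw [hgx]
    unfold pvLookup
    rw [hf]
    rfl

-- characterisation of the overlay's items: base entries substituted, new right entries appended
lemma pvMergeChar (R : List (String × Option (List (String × String)))) :
    ∀ (b : PySem.Dict String (Option (List (String × String)))),
    (R.map Prod.fst).Nodup → b.keys.Nodup →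
    (pvOverlay R b).items
      = b.items.map (fun p =>
          match pvLookup R p.1 with
          | some rv => (p.1, rv)
          | none => p)
        ++ R.filter (fun kv => !(b.contains kv.1)) := by
  induction R with
  | nil =>
    intro b _ _
    show b.items = b.items.map (fun p => p) ++ []
    simp
  | cons p tl ih =>
    intro b hnr hbn
    obtain ⟨k, v⟩ := p
    have hk_notin : k ∉ tl.map Prod.fst := by
      simp only [List.map_cons, List.nodup_cons] at hnr; exact hnr.1
    have hnr' : (tl.map Prod.fst).Nodup := by
      simp only [List.map_cons, List.nodup_cons] at hnr; exact hnr.2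
    have hne_tl : ∀ kv ∈ tl, kv.1 ≠ k := by
      intro kv hkv he
      exact hk_notin (he ▸ List.mem_map_of_mem hkv)
    have hstep : pvOverlay ((k, v) :: tl) b = pvOverlay tl (b.insert k v) := rfl
    rw [hstep, ih _ hnr' (PySem.Dict.nodup_keys_insert _ _ _ hbn)]
    have hfilter : tl.filter (fun kv => !((b.insert k v).contains kv.1))
        = tl.filter (fun kv => !(b.contains kv.1)) := by
      apply List.filter_congr
      intro kv hkv
      rw [PySem.Dict.contains_insert]
      have : (kv.1 == k) = false := by
        simp [hne_tl kv hkv]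
      rw [this]
      rfl
    rw [hfilter]
    by_cases hc : b.contains k = true
    · rw [PySem.Dict.items_insert_of_contains b v hc, List.map_map]
      have hmap : b.items.map ((fun p => match pvLookup tl p.1 with
            | some rv => (p.1, rv) | none => p) ∘ (fun p => if p.1 == k then (k, v) else p))
          = b.items.map (fun p => match pvLookup ((k, v) :: tl) p.1 with
            | some rv => (p.1, rv) | none => p) := by
        apply List.map_congr_left
        intro q _
        by_cases hq : q.1 = k
        · simp only [Function.comp, hq, beq_self_eq_true, if_pos]
          rw [pvLookup_cons, if_pos rfl]
          simp only
          rw [pvLookup_eq_none hk_notin]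
        · have : (q.1 == k) = false := by simp [hq]
          simp only [Function.comp, this, Bool.false_eq_true, if_false]
          rw [pvLookup_cons, if_neg (fun he => hq he.symm)]
      rw [hmap]
      have hfc : (((k, v) :: tl).filter (fun kv => !(b.contains kv.1)))
          = tl.filter (fun kv => !(b.contains kv.1)) := by
        rw [List.filter_cons]
        simp [hc]
      rw [hfc]
    · have hc' : b.contains k = false := by
        cases h : b.contains k
        · rfl
        · exact absurd h hc
      rw [PySem.Dict.items_insert_of_not_contains b v hc', List.map_append]
      have hsingle : ([((k : String), (v : Option (List (String × String))))].map
          (fun p => match pvLookup tl p.1 with | some rv => (p.1, rv) | none => p))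
          = [(k, v)] := by
        simp only [List.map_cons, List.map_nil]
        rw [pvLookup_eq_none hk_notin]
      rw [hsingle]
      have hmap : b.items.map (fun p => match pvLookup tl p.1 with
            | some rv => (p.1, rv) | none => p)
          = b.items.map (fun p => match pvLookup ((k, v) :: tl) p.1 with
            | some rv => (p.1, rv) | none => p) := by
        apply List.map_congr_left
        intro q hq
        have hqk : q.1 ≠ k := by
          intro he
          have : q.1 ∈ b.keys := PySem.Dict.mem_keys_of_mem_items _ hq
          rw [he] at this
          rw [PySem.Dict.contains_eq_decide_mem_keys] at hc'
          simp [this] at hc'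
        rw [pvLookup_cons, if_neg (fun he => hqk he.symm)]
      rw [hmap]
      have hfc : (((k, v) :: tl).filter (fun kv => !(b.contains kv.1)))
          = (k, v) :: tl.filter (fun kv => !(b.contains kv.1)) := by
        rw [List.filter_cons]
        simp [hc']
      rw [hfc, List.append_assoc, List.singleton_append]

-- a skip-or-insert fold over fresh distinct keys appends its filterMap
lemma pvFoldl_fm {α : Type} (xs : List α)
    (f : α → Option (String × List (String × String))) :
    ∀ (d : PySem.Dict String (List (String × String))),
    ((xs.filterMap f).map Prod.fst).Nodup →
    (∀ p ∈ xs.filterMap f, d.contains p.1 = false) →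
    (xs.foldl (fun d a =>
        match f a with
        | none => d
        | some p => d.insert p.1 p.2) d).items = d.items ++ xs.filterMap f := by
  induction xs with
  | nil => intro d _ _; simp
  | cons a tl ih =>
    intro d hnd hfresh
    rcases hfa : f a with _ | p
    · rw [List.foldl_cons, hfa]
      have hfm : (a :: tl).filterMap f = tl.filterMap f := by
        rw [List.filterMap_cons, hfa]
      rw [hfm] at hnd hfresh ⊢
      exact ih d hnd hfresh
    · have hfm : (a :: tl).filterMap f = p :: tl.filterMap f := by
        rw [List.filterMap_cons, hfa]
      rw [hfm] at hnd hfresh ⊢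
      have hp_notin : p.1 ∉ (tl.filterMap f).map Prod.fst := by
        simp only [List.map_cons, List.nodup_cons] at hnd; exact hnd.1
      have hnd' : ((tl.filterMap f).map Prod.fst).Nodup := by
        simp only [List.map_cons, List.nodup_cons] at hnd; exact hnd.2
      have hdp : d.contains p.1 = false := hfresh p (List.mem_cons_self)
      rw [List.foldl_cons, hfa]
      have hfresh' : ∀ q ∈ tl.filterMap f, (d.insert p.1 p.2).contains q.1 = false := by
        intro q hq
        rw [PySem.Dict.contains_insert]
        have h1 : (q.1 == p.1) = false := by
          have : q.1 ≠ p.1 := fun he => hp_notin (he ▸ List.mem_map_of_mem hq)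
          simp [this]
        rw [h1, hfresh q (List.mem_cons_of_mem _ hq)]
        rfl
      rw [ih _ hnd' hfresh', PySem.Dict.items_insert_of_not_contains d p.2 hdp]
      simp

-- a key-preserving filterMap's keys form a sublist of the original keys
lemma pvFm_keys_sublist {α : Type} (xs : List α)
    (f : α → Option (String × List (String × String))) (key : α → String)
    (h : ∀ a p, f a = some p → p.1 = key a) :
    ((xs.filterMap f).map Prod.fst).Sublist (xs.map key) := by
  induction xs with
  | nil => simp
  | cons a tl ih =>
    rw [List.filterMap_cons, List.map_cons]
    rcases hfa : f a with _ | p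
    · exact ih.cons (key a)
    · rw [List.map_cons, h a p hfa]
      exact ih.cons₂ (key a)

-- dropNone after a value-transforming map is a filterMap
lemma pvDropNone_map {α : Type} (l : List α)
    (h : α → String × Option (List (String × String))) :
    pvDropNone (l.map h)
      = l.filterMap (fun a => ((h a).2).map (fun v => ((h a).1, v))) := by
  unfold pvDropNone
  rw [List.filterMap_map]
  rfl

-- dropNone after a filter is a filterMap
lemma pvDropNone_filter (l : List (String × Option (List (String × String))))
    (p : String × Option (List (String × String)) → Bool) :
    pvDropNone (l.filter p)
      = l.filterMap (fun kv => if p kv then kv.2.map (fun v => (kv.1, v)) else none) := by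
  induction l with
  | nil => rfl
  | cons a tl ih =>
    rw [List.filter_cons, List.filterMap_cons]
    by_cases hp : p a = true
    · rw [if_pos hp, if_pos hp]
      obtain ⟨ak, av⟩ := a
      cases av with
      | none => rw [pvDropNone_cons_none, ih]; rfl
      | some v => rw [pvDropNone_cons_some, ih]; rfl
    · rw [if_neg hp, if_neg hp, ih]

-- pass 1's per-entry effect as a partial map
def pvFL (right : List (String × Option (List (String × String))))
    (kv : String × List (String × String)) : Option (String × List (String × String)) :=
  match pvLookup right kv.1 with
  | some upd =>
    match upd with
    | some u => some (kv.1, u)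
    | none => none
  | none => some (kv.1, kv.2)

-- pass 2's per-entry effect as a partial map
def pvFG (leftD : PySem.Dict String (List (String × String)))
    (kv : String × Option (List (String × String))) :
    Option (String × List (String × String)) :=
  if leftD.contains kv.1 then none
  else kv.2.map (fun u => (kv.1, u))

lemma pvFL_key (right : List (String × Option (List (String × String))))
    (a : String × List (String × String)) (p : String × List (String × String))
    (h : pvFL right a = some p) : p.1 = a.1 := by
  unfold pvFL at h
  rcases hl : pvLookup right a.1 with _ | upd <;> rw [hl] at h
  · injection h with h; rw [← h]
  · rcases upd with _ | u
    · simp at h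
    · injection h with h; rw [← h]

lemma pvFG_key (leftD : PySem.Dict String (List (String × String)))
    (a : String × Option (List (String × String))) (p : String × List (String × String))
    (h : pvFG leftD a = some p) : p.1 = a.1 := by
  obtain ⟨ak, av⟩ := a
  unfold pvFG at h
  by_cases hc : leftD.contains (ak, av).1 = true
  · rw [if_pos hc] at h; simp at h
  · rw [if_neg hc] at h
    cases av with
    | none => simp at h
    | some u => simp only [Option.map_some, Option.some.injEq] at h; rw [← h]

lemma pvFG_not_contains (leftD : PySem.Dict String (List (String × String)))
    (a : String × Option (List (String × String))) (p : String × List (String × String))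
    (h : pvFG leftD a = some p) : leftD.contains p.1 = false := by
  have hk := pvFG_key leftD a p h
  unfold pvFG at h
  by_cases hc : leftD.contains a.1 = true
  · rw [if_pos hc] at h; simp at h
  · rw [hk]
    cases hco : leftD.contains a.1
    · rfl
    · exact absurd hco hc

-- pass 1 lists exactly its filterMap
lemma pvPass1_items (right : List (String × Option (List (String × String))))
    (hnr : (right.map Prod.fst).Nodup)
    (L : List (String × List (String × String)))
    (hL : (L.map Prod.fst).Nodup) :
    (pvBPass1 (pvBRightD right) L).items = L.filterMap (pvFL right) := by
  have hstep : (fun (res : PySem.Dict String (List (String × String))) (kv : String × List (String × String)) =>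
      match (pvBRightD right).get? kv.1 with
      | some upd =>
        match upd with
        | some u => res.insert kv.1 u
        | none => res
      | none => res.insert kv.1 kv.2)
      = (fun (res : PySem.Dict String (List (String × String))) (kv : String × List (String × String)) =>
          match pvFL right kv with
          | none => res
          | some p => res.insert p.1 p.2) := by
    funext res kv
    rw [pvGet?_rightD right hnr]
    unfold pvFL
    rcases pvLookup right kv.1 with _ | upd
    · rfl
    · rcases upd with _ | u <;> rfl
  show (L.foldl (fun res kv =>
      match (pvBRightD right).get? kv.1 with
      | some upd =>
        match upd with
        | some u => res.insert kv.1 u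
        | none => res
      | none => res.insert kv.1 kv.2) PySem.Dict.empty).items = L.filterMap (pvFL right)
  rw [hstep]
  have hnd : ((L.filterMap (pvFL right)).map Prod.fst).Nodup :=
    (pvFm_keys_sublist L (pvFL right) Prod.fst (pvFL_key right)).nodup hL
  have := pvFoldl_fm L (pvFL right) PySem.Dict.empty hnd
    (fun p _ => PySem.Dict.contains_empty _)
  rw [this]
  rfl

-- pass 2 appends exactly its filterMap
lemma pvPass2_items (leftD res1 : PySem.Dict String (List (String × String)))
    (R : List (String × Option (List (String × String))))
    (hnd : ((R.filterMap (pvFG leftD)).map Prod.fst).Nodup)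
    (hfresh : ∀ p ∈ R.filterMap (pvFG leftD), res1.contains p.1 = false) :
    (pvBPass2 leftD res1 R).items = res1.items ++ R.filterMap (pvFG leftD) := by
  have hstep : (fun (res : PySem.Dict String (List (String × String))) (kv : String × Option (List (String × String))) =>
      if leftD.contains kv.1 then res
      else
        match kv.2 with
        | some u => res.insert kv.1 u
        | none => res)
      = (fun (res : PySem.Dict String (List (String × String))) (kv : String × Option (List (String × String))) =>
          match pvFG leftD kv with
          | none => res
          | some p => res.insert p.1 p.2) := by
    funext res kv
    unfold pvFG
    by_cases hc : leftD.contains kv.1 = true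
    · rw [if_pos hc, if_pos hc]
    · rw [if_neg hc, if_neg hc]
      rcases kv.2 with _ | u <;> rfl
  show (R.foldl (fun res kv =>
      if leftD.contains kv.1 then res
      else
        match kv.2 with
        | some u => res.insert kv.1 u
        | none => res) res1).items = res1.items ++ R.filterMap (pvFG leftD)
  rw [hstep]
  exact pvFoldl_fm R (pvFG leftD) res1 hnd hfresh

lemma pvDropNone_append (x y : List (String × Option (List (String × String)))) :
    pvDropNone (x ++ y) = pvDropNone x ++ pvDropNone y := by
  simp [pvDropNone]

-- ===== VERDICT (by name: the statement is the Claim_ definition above) =====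
theorem file_data_reducer_py_spec : Claim_equal_file_data_reducer_py := by
  intro left right _hdom hpre
  unfold Spec_file_data_reducer_py
  have hpre' : (right.map Prod.fst).Nodup := hpre
  have hright : (pvBRightD right).items = right := pvFoldl_insert_items right hpre'
  cases left with
  | none =>
    show (pvASkip right).items
        = (pvBPass2 PySem.Dict.empty
            (pvBPass1 (pvBRightD right) (PySem.Dict.empty :
              PySem.Dict String (List (String × String))).items)
            (pvBRightD right).items).items
    rw [hright]
    have hstep : (fun (res : PySem.Dict String (List (String × String))) (kv : String × Option (List (String × String))) =>
        if (PySem.Dict.empty : PySem.Dict String (List (String × String))).contains kv.1 then res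
        else
          match kv.2 with
          | some u => res.insert kv.1 u
          | none => res)
        = (fun (d : PySem.Dict String (List (String × String))) (kv : String × Option (List (String × String))) =>
            match kv.2 with
            | none => d
            | some v => d.insert kv.1 v) := by
      funext res kv
      rw [PySem.Dict.contains_empty]
      rcases kv.2 with _ | u <;> rfl
    show ((right.foldl (fun (d : PySem.Dict String (List (String × String))) (kv : String × Option (List (String × String))) =>
        match kv.2 with
        | none => d
        | some v => d.insert kv.1 v) PySem.Dict.empty)).items
        = ((right.foldl (fun (res : PySem.Dict String (List (String × String))) (kv : String × Option (List (String × String))) =>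
            if (PySem.Dict.empty : PySem.Dict String (List (String × String))).contains kv.1 then res
            else
              match kv.2 with
              | some u => res.insert kv.1 u
              | none => res) PySem.Dict.empty)).items
    rw [hstep]
  | some l =>
    have hLnd : (pvBLeftD l).keys.Nodup := by
      show (l.foldl (fun d kv => d.insert kv.1 kv.2) PySem.Dict.empty).keys.Nodup
      exact PySem.Dict.nodup_keys_foldl_insert_key l Prod.fst (fun _ kv => kv.2) _
        PySem.Dict.nodup_keys_empty
    have hLnd' : ((pvBLeftD l).items.map Prod.fst).Nodup := hLnd
    -- B's value
    have hres1 : (pvBPass1 (pvBRightD right) (pvBLeftD l).items).items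
        = (pvBLeftD l).items.filterMap (pvFL right) := pvPass1_items right hpre' _ hLnd'
    have hgnd : ((right.filterMap (pvFG (pvBLeftD l))).map Prod.fst).Nodup :=
      (pvFm_keys_sublist right (pvFG (pvBLeftD l)) Prod.fst
        (pvFG_key (pvBLeftD l))).nodup hpre'
    have hgfresh : ∀ p ∈ right.filterMap (pvFG (pvBLeftD l)),
        (pvBPass1 (pvBRightD right) (pvBLeftD l).items).contains p.1 = false := by
      intro p hp
      obtain ⟨a, _, hfa⟩ := List.mem_filterMap.mp hp
      have hnc : (pvBLeftD l).contains p.1 = false := pvFG_not_contains _ a p hfa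
      rw [PySem.Dict.contains_eq_decide_mem_keys] at hnc ⊢
      rw [decide_eq_false_iff_not] at hnc ⊢
      intro hmem
      apply hnc
      have hmem' : p.1 ∈ (pvBPass1 (pvBRightD right) (pvBLeftD l).items).items.map Prod.fst := hmem
      rw [hres1] at hmem'
      exact (pvFm_keys_sublist (pvBLeftD l).items (pvFL right) Prod.fst
        (pvFL_key right)).mem hmem'
    have hB : file_data_reducer_py_alt (some l) right
        = (pvBLeftD l).items.filterMap (pvFL right)
          ++ right.filterMap (pvFG (pvBLeftD l)) := by
      show (pvBPass2 (pvBLeftD l)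
          (pvBPass1 (pvBRightD right) (pvBLeftD l).items) (pvBRightD right).items).items = _
      rw [hright, pvPass2_items _ _ _ hgnd hgfresh, hres1]
    -- A's value
    have hWitems : (pvWrapL l).items
        = (pvBLeftD l).items.map (fun p => (p.1, some p.2)) := pvWrapL_items l
    have hWnd : (pvWrapL l).keys.Nodup := by
      show (l.foldl (fun d kv => d.insert kv.1 (some kv.2)) PySem.Dict.empty).keys.Nodup
      exact PySem.Dict.nodup_keys_foldl_insert_key l Prod.fst (fun _ kv => some kv.2) _
        PySem.Dict.nodup_keys_empty
    have hWcont : ∀ x, (pvWrapL l).contains x = (pvBLeftD l).contains x := by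
      intro x
      have hkeys : (pvWrapL l).keys = (pvBLeftD l).keys := by
        show (pvWrapL l).items.map Prod.fst = (pvBLeftD l).items.map Prod.fst
        rw [hWitems, List.map_map]
        exact List.map_congr_left (fun q _ => rfl)
      rw [PySem.Dict.contains_eq_decide_mem_keys, PySem.Dict.contains_eq_decide_mem_keys, hkeys]
    have hnone : ∀ kv ∈ right, (pvWrapL l).get? kv.1 ≠ some none := by
      intro kv _ hget
      have hmem := PySem.Dict.mem_items_of_get?_eq_some _ hget
      rw [hWitems] at hmem
      obtain ⟨q, _, hq⟩ := List.mem_map.mp hmem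
      simpa using congrArg Prod.snd hq
    have hA : file_data_reducer_py (some l) right
        = pvDropNone (pvOverlay right (pvWrapL l)).items := by
      show (pvAUpdate right (pvAFromLeft l)).items = _
      exact pvMain right (pvAFromLeft l) (pvWrapL l) hpre' hWnd
        (by rw [hWitems, pvDropNone_map_wrap]; rfl) hnone
    rw [hA, hB, pvMergeChar right (pvWrapL l) hpre' hWnd, pvDropNone_append]
    congr 1
    · -- substituted base part
      rw [hWitems, List.map_map, pvDropNone_map]
      apply List.filterMap_congr
      intro q _
      simp only [Function.comp]
      unfold pvFL
      rcases pvLookup right q.1 with _ | upd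
      · rfl
      · rcases upd with _ | u <;> rfl
    · -- new-keys part
      rw [pvDropNone_filter]
      apply List.filterMap_congr
      intro kv _
      rw [hWcont kv.1]
      unfold pvFG
      cases hc : (pvBLeftD l).contains kv.1
      · rfl
      · rfl
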